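-- pv_equiv track=rewrite | github.com/JuHyang/today-I-learned | Algorithm-Study/line_2020/1.py | solution
-- ===== SOURCE A (Python) =====
-- def solution(boxes):
--     answer = -1
--
--     countBox = len(boxes)
--
--     numbers = dict()
--     for box in boxes:
--         for num in box:
--             if num in numbers:
--                 numbers[num] += 1
--             else:
--                 numbers[num] = 1
--
--     madeBox = 0
--
--     for num in numbers.keys():
--         if numbers[num] >= 2:
--             madeBox += numbers[num] // 2
--
--     return countBox - madeBox
-- ===== SOURCE B (Python) =====
-- def solution(boxes):
--     nums = sorted(num for box in boxes for num in box)
--     made = 0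
--     i = 0
--     n = len(nums)
--     # consume the sorted list run by run; each run of j - i equal values
--     # contributes (j - i) // 2 pairs
--     while i < n:
--         j = i + 1
--         while j < n and nums[j] == nums[i]:
--             j += 1
--         made += (j - i) // 2
--         i = j
--     return len(boxes) - made
-- ===== Notes on version B (the rewrite author's own statement) =====
-- stated objective: alternative
-- what changed: Replaces the hash-count dictionary plus key scan with flatten-sort-and-run-count: the sorted flattened list is consumed run by run, each run of equal values contributing run_length // 2 pairs.
import Mathlib
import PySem

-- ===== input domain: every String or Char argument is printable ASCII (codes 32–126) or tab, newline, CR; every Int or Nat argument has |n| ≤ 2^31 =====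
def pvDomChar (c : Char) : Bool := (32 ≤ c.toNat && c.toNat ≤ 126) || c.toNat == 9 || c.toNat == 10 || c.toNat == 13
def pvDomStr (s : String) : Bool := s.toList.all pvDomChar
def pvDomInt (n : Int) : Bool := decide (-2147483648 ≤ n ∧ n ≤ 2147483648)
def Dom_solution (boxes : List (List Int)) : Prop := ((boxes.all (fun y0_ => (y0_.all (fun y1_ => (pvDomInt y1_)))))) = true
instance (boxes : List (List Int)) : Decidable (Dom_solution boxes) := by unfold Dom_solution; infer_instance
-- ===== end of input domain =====

-- B replaces A's hash-count dictionary + key scan with flatten, sort, and a run-count pass (alternative algorithm, not claimed faster).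

-- ===== PORT A =====
def solution (boxes : List (List Int)) : Int :=
  let countBox : Int := boxes.length
  let numbers : PySem.Dict Int Int :=
    boxes.foldl (fun numbers box =>
      box.foldl (fun numbers num =>
        if numbers.contains num then numbers.insert num (numbers.getD num 0 + 1)
        else numbers.insert num 1) numbers) PySem.Dict.empty
  let madeBox : Int :=
    numbers.keys.foldl (fun madeBox num =>
      if numbers.getD num 0 ≥ 2 then madeBox + PySem.Int.floordiv (numbers.getD num 0) 2
      else madeBox) 0
  countBox - madeBox

-- ===== PORT B =====
-- Source B's run-scan loop: the inner while counts the run of values equal to nums[i]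
-- (j - i = 1 + length of the equal run after nums[i]); the outer loop continues at i = j.
-- Ported as run-by-run recursion on the not-yet-consumed suffix of the sorted list.
def pairsRec : List Int → Int
  | [] => 0
  | x :: xs =>
    let i : Nat := 1 + (xs.takeWhile (· == x)).length
    PySem.Int.floordiv (i : Int) 2 + pairsRec (xs.dropWhile (· == x))
termination_by l => l.length
decreasing_by
  simp only [List.length_cons]
  exact Nat.lt_succ_of_le (List.length_dropWhile_le _ _)

def solution_alt (boxes : List (List Int)) : Int :=
  let nums := PySem.List.sorted boxes.flatten (fun x => x) false
  (boxes.length : Int) - pairsRec nums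

-- ===== PRECONDITION & SPEC =====
def Spec_solution (boxes : List (List Int)) (out : Int) : Prop := out = solution_alt boxes
instance (boxes : List (List Int)) (out : Int) : Decidable (Spec_solution boxes out) := by unfold Spec_solution; infer_instance

-- ===== CLAIM (what is proved, stated in full; the proofs are below) =====
def Claim_equal_solution : Prop := ∀ (boxes : List (List Int)), Dom_solution boxes → Spec_solution boxes (solution boxes)

-- ===== LEMMAS AND PROOFS =====

-- Reference value: sum over the distinct values of a list of count // 2.
def pairSum (l : List Int) : Int :=
  ((PySem.Set.ofList l).map (fun v => PySem.Int.floordiv (l.count v : Int) 2)).sum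

theorem foldl_add_map {α : Type} (l : List α) (f : α → Int) (init : Int) :
    l.foldl (fun acc v => acc + f v) init = init + (l.map f).sum := by
  induction l generalizing init with
  | nil => simp
  | cons x xs ih => simp [List.foldl_cons, ih (init + f x)]; ring

theorem counter_step (d : PySem.Dict Int Int) (k : Int) :
    d.modify k 0 (· + 1) =
      if d.contains k then d.insert k (d.getD k 0 + 1) else d.insert k 1 := by
  by_cases h : d.contains k <;> simp [PySem.Dict.modify, PySem.Dict.getD, h]
  rw [(PySem.Dict.get?_eq_none_iff_contains d k).2 (by simpa using h)]; rfl

theorem dict_is_counter (boxes : List (List Int)) :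
    boxes.foldl (fun numbers box =>
      box.foldl (fun numbers num =>
        if numbers.contains num then numbers.insert num (numbers.getD num 0 + 1)
        else numbers.insert num 1) numbers) PySem.Dict.empty
      = PySem.Dict.counter boxes.flatten := by
  rw [PySem.Dict.counter_eq_foldl, ← List.foldl_flatten]
  have : (fun (d : PySem.Dict Int Int) (x : Int) => d.modify x 0 (· + 1))
      = fun d x => if d.contains x then d.insert x (d.getD x 0 + 1) else d.insert x 1 := by
    funext d x; exact counter_step d x
  rw [this]

theorem solution_eq_pairSum (boxes : List (List Int)) :
    solution boxes = (boxes.length : Int) - pairSum boxes.flatten := by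
  unfold solution
  dsimp only
  rw [dict_is_counter]
  congr 1
  rw [PySem.Dict.keys_counter]
  rw [PySem.List.foldl_congr_mem (PySem.Set.ofList boxes.flatten)
      _ (fun acc v => acc + PySem.Int.floordiv ((boxes.flatten.count v : Int)) 2) 0
      (by
        intro acc v hv
        rw [PySem.Dict.getD_counter]
        have hmem : v ∈ boxes.flatten := (PySem.Set.mem_ofList _ _).1 hv
        have hc : 1 ≤ boxes.flatten.count v := List.one_le_count_iff.2 hmem
        by_cases h2 : ((boxes.flatten.count v : Int)) ≥ 2
        · simp [h2]
        · have h1 : boxes.flatten.count v = 1 := by omega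
          simp [h1])]
  rw [foldl_add_map]
  simp [pairSum]

theorem pairSum_perm {l l' : List Int} (h : l.Perm l') : pairSum l = pairSum l' := by
  unfold pairSum
  have hperm : (PySem.Set.ofList l).Perm (PySem.Set.ofList l') := by
    rw [List.perm_ext_iff_of_nodup (PySem.Set.nodup_ofList _) (PySem.Set.nodup_ofList _)]
    intro a
    rw [PySem.Set.mem_ofList, PySem.Set.mem_ofList]
    exact h.mem_iff
  have hmap : (PySem.Set.ofList l).map (fun v => PySem.Int.floordiv (l.count v : Int) 2)
      = (PySem.Set.ofList l).map (fun v => PySem.Int.floordiv (l'.count v : Int) 2) := by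
    apply List.map_congr_left; intro v _; rw [h.count_eq]
  rw [hmap]
  exact (hperm.map _).sum_eq

theorem not_mem_dropWhile_sorted (x : Int) (xs : List Int)
    (hxs : xs.Pairwise (· ≤ ·)) (hx : ∀ y ∈ xs, x ≤ y) :
    ∀ y ∈ xs.dropWhile (· == x), y ≠ x := by
  induction xs with
  | nil => simp
  | cons a t ih =>
    rw [List.dropWhile_cons]
    by_cases ha : ((a == x) = true)
    · rw [if_pos ha]
      exact ih (List.pairwise_cons.1 hxs).2 (fun y hy => hx y (List.mem_cons_of_mem a hy))
    · rw [if_neg ha]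
      intro y hy
      have hane : a ≠ x := by simpa using ha
      have hxa : x < a := lt_of_le_of_ne (hx a (List.mem_cons_self)) (Ne.symm hane)
      rcases List.mem_cons.1 hy with rfl | hyt
      · exact hane
      · have : a ≤ y := (List.pairwise_cons.1 hxs).1 y hyt
        omega

theorem pairsRec_sorted (l : List Int) (hs : l.Pairwise (· ≤ ·)) :
    pairsRec l = pairSum l := by
  induction hn : l.length using Nat.strong_induction_on generalizing l with
  | _ n ih =>
  match l, hs with
  | [], _ => simp [pairsRec, pairSum, PySem.Set.ofList]
  | x :: xs, hs =>
    have hx : ∀ y ∈ xs, x ≤ y := (List.pairwise_cons.1 hs).1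
    have hxs : xs.Pairwise (· ≤ ·) := (List.pairwise_cons.1 hs).2
    set run := xs.takeWhile (· == x) with hrun
    set rest := xs.dropWhile (· == x) with hrest
    have hsplit : xs = run ++ rest := (List.takeWhile_append_dropWhile).symm
    have hrunx : ∀ y ∈ run, y = x := by
      intro y hy; have := List.mem_takeWhile_imp hy; simpa using this
    have hrestne : ∀ y ∈ rest, y ≠ x := not_mem_dropWhile_sorted x xs hxs hx
    have hrestp : rest.Pairwise (· ≤ ·) := by
      rw [hsplit] at hxs; exact (List.pairwise_append.1 hxs).2.1
    have hcountx : (x :: xs).count x = 1 + run.length := by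
      rw [hsplit, List.count_cons_self, List.count_append]
      have h1 : run.count x = run.length := List.count_eq_length.2 (by
        intro y hy; exact (hrunx y hy).symm)
      have h2 : rest.count x = 0 := List.count_eq_zero.2 (by
        intro hmem; exact hrestne x hmem rfl)
      omega
    have hcount_rest : ∀ v ∈ rest, (x :: xs).count v = rest.count v := by
      intro v hv
      have hvx : v ≠ x := hrestne v hv
      rw [hsplit, List.count_cons_of_ne (Ne.symm hvx), List.count_append]
      have : run.count v = 0 := List.count_eq_zero.2 (by
        intro hmem; exact hvx (hrunx v hmem))
      omega
    have hsetperm : (PySem.Set.ofList (x :: xs)).Perm (x :: PySem.Set.ofList rest) := by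
      rw [List.perm_ext_iff_of_nodup (PySem.Set.nodup_ofList _)
        (List.nodup_cons.2 ⟨fun hmem => hrestne x ((PySem.Set.mem_ofList _ _).1 hmem) rfl,
          PySem.Set.nodup_ofList _⟩)]
      intro a
      rw [PySem.Set.mem_ofList, List.mem_cons, List.mem_cons, PySem.Set.mem_ofList]
      constructor
      · rintro (rfl | ha)
        · exact Or.inl rfl
        · rw [hsplit, List.mem_append] at ha
          rcases ha with ha | ha
          · exact Or.inl (hrunx a ha)
          · exact Or.inr ha
      · rintro (rfl | ha)
        · exact Or.inl rfl
        · exact Or.inr (by rw [hsplit, List.mem_append]; exact Or.inr ha)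
    have hIH : pairsRec rest = pairSum rest := by
      apply ih rest.length _ rest hrestp rfl
      subst hn
      calc rest.length ≤ xs.length := by rw [hrest]; exact List.length_dropWhile_le _ _
        _ < (x :: xs).length := by simp
    rw [pairsRec]
    simp only [← hrun, ← hrest]
    rw [hIH]
    unfold pairSum
    rw [(hsetperm.map (fun v => PySem.Int.floordiv (((x :: xs).count v : Int)) 2)).sum_eq]
    rw [List.map_cons, List.sum_cons, hcountx]
    congr 1
    apply congrArg List.sum
    apply List.map_congr_left
    intro v hv
    rw [← hcount_rest v ((PySem.Set.mem_ofList _ _).1 hv)]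

-- ===== VERDICT (by name: the statement is the Claim_ definition above) =====
theorem solution_spec : Claim_equal_solution := by
  intro boxes _
  unfold Spec_solution solution_alt
  dsimp only
  rw [solution_eq_pairSum]
  rw [pairsRec_sorted _ (by simpa using PySem.List.sorted_pairwise boxes.flatten (fun x => x))]
  rw [pairSum_perm (PySem.List.sorted_perm boxes.flatten (fun x => x) false)]
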